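-- pv_equiv track=rewrite | github.com/lolsZz/aid | aider/dyslexic_support.py | _format_code_for_speech
-- ===== SOURCE A (Python) =====
-- def _format_code_for_speech(code):
--     """Format code for better text-to-speech output."""
--     # Replace common symbols with spoken equivalents
--     replacements = {
--         '{': 'open brace',
--         '}': 'close brace',
--         '(': 'open parenthesis',
--         ')': 'close parenthesis',
--         '[': 'open bracket',
--         ']': 'close bracket',
--         '=': 'equals',
--         '=>': 'arrow',
--         ';': 'semicolon',
--         '\n': ' new line ',
--     }
--
--     result = code
--     for symbol, spoken in replacements.items():
--         result = result.replace(symbol, f' {spoken} ')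
--
--     return result
-- ===== SOURCE B (Python) =====
-- def _format_code_for_speech(code):
--     """Format code for better text-to-speech output."""
--     pieces = []
--     for ch in code:
--         if ch == '{':
--             pieces.append(' open brace ')
--         elif ch == '}':
--             pieces.append(' close brace ')
--         elif ch == '(':
--             pieces.append(' open parenthesis ')
--         elif ch == ')':
--             pieces.append(' close parenthesis ')
--         elif ch == '[':
--             pieces.append(' open bracket ')
--         elif ch == ']':
--             pieces.append(' close bracket ')
--         elif ch == '=':
--             pieces.append(' equals ')
--         elif ch == ';':
--             pieces.append(' semicolon ')
--         elif ch == '\n':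
--             pieces.append('  new line  ')
--         else:
--             pieces.append(ch)
--     return ''.join(pieces)
-- ===== Notes on version B (the rewrite author's own statement) =====
-- stated objective: simpler
-- what changed: B makes a single left-to-right pass over the characters with an explicit if/elif chain appending each space-wrapped spoken word (or the character itself) to an accumulator list joined once at the end, instead of A's ten successive full-string replace passes over a dict; A's two-character arrow entry is dead (the equals pass has already consumed its first character), so the per-character chain reproduces A exactly.
import Mathlib
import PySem

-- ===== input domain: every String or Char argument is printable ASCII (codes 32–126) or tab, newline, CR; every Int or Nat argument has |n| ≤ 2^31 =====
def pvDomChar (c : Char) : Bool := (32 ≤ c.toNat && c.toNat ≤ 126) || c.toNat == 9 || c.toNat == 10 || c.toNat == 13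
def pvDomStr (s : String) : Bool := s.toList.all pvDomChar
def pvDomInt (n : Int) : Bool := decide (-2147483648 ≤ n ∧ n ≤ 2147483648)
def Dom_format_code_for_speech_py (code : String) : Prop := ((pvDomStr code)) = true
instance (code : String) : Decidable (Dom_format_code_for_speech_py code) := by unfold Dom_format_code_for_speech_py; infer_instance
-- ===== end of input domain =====

-- B replaces A's ten successive full-string .replace passes over a dict by one pass over
-- the characters with an explicit if/elif chain and an accumulator (objective: simpler).

-- ===== PORT A =====
-- A's replacements dict (its '=>' key is dead: the '=' pass has already consumed every '=')
def pvReplacements : PySem.Dict String String := PySem.Dict.ofList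
  [ ("{", "open brace")
  , ("}", "close brace")
  , ("(", "open parenthesis")
  , (")", "close parenthesis")
  , ("[", "open bracket")
  , ("]", "close bracket")
  , ("=", "equals")
  , ("=>", "arrow")
  , (";", "semicolon")
  , ("\n", " new line ") ]

-- result = code; for symbol, spoken in replacements.items(): result = result.replace(symbol, f' {spoken} ')
def format_code_for_speech_py (code : String) : String :=
  pvReplacements.items.foldl
    (fun result p => PySem.Str.replace result p.1 (" " ++ p.2 ++ " ")) code

-- ===== PORT B =====
-- the if/elif chain body of B's loop: the piece appended for one character
def pvPiece (ch : Char) : List Char :=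
  if ch = '{' then " open brace ".toList
  else if ch = '}' then " close brace ".toList
  else if ch = '(' then " open parenthesis ".toList
  else if ch = ')' then " close parenthesis ".toList
  else if ch = '[' then " open bracket ".toList
  else if ch = ']' then " close bracket ".toList
  else if ch = '=' then " equals ".toList
  else if ch = ';' then " semicolon ".toList
  else if ch = '\n' then "  new line  ".toList
  else [ch]

-- the for-loop: pieces accumulated left to right, then ''.join(pieces)
def pvAltLoop (acc : List Char) : List Char → List Char
  | [] => acc
  | ch :: rest => pvAltLoop (acc ++ pvPiece ch) rest

def format_code_for_speech_py_alt (code : String) : String :=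
  String.ofList (pvAltLoop [] code.toList)

-- ===== PRECONDITION & SPEC =====
def Spec_format_code_for_speech_py (code : String) (out : String) : Prop := out = format_code_for_speech_py_alt code
instance (code : String) (out : String) : Decidable (Spec_format_code_for_speech_py code out) := by unfold Spec_format_code_for_speech_py; infer_instance

-- ===== CLAIM =====
def Claim_equal_format_code_for_speech_py : Prop := ∀ (code : String), Dom_format_code_for_speech_py code → Spec_format_code_for_speech_py code (format_code_for_speech_py code)

-- ===== LEMMAS AND PROOFS =====

lemma pvItems : pvReplacements.items =
  [ ("{", "open brace") , ("}", "close brace") , ("(", "open parenthesis")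
  , (")", "close parenthesis") , ("[", "open bracket") , ("]", "close bracket")
  , ("=", "equals") , ("=>", "arrow") , (";", "semicolon") , ("\n", " new line ") ] := by decide

-- replacing a SINGLE character a by new is the per-character expansion
lemma go_single (a : Char) (new : List Char) : ∀ (l : List Char) (fuel : Nat) (acc : List Char), l.length ≤ fuel → PySem.Chars.replace.go [a] new fuel l acc = acc.reverse ++ l.flatMap (fun c => if c = a then new else [c]) := by
  intro l
  induction l with
  | nil => intro fuel acc h; cases fuel <;> simp [PySem.Chars.replace.go]
  | cons c t ih =>
    intro fuel acc h
    cases fuel with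
    | zero => simp at h
    | succ f =>
      simp only [PySem.Chars.replace.go]
      by_cases hc : c = a
      · subst hc
        simp [List.isPrefixOf, ih f _ (by simpa using h)]
      · simp [List.isPrefixOf, hc, Ne.symm hc, ih f _ (by simpa using h)]

lemma replace_single (a : Char) (new s : List Char) :
    PySem.Chars.replace s [a] new = s.flatMap (fun c => if c = a then new else [c]) := by
  rw [PySem.Chars.replace]
  simp [go_single a new s s.length [] le_rfl]

-- the "=>" pass is the identity on a string that no longer contains '='
lemma go_arrow (new : List Char) : ∀ (l : List Char) (fuel : Nat) (acc : List Char), l.length ≤ fuel → '=' ∉ l → PySem.Chars.replace.go ['=', '>'] new fuel l acc = acc.reverse ++ l := by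
  intro l
  induction l with
  | nil => intro fuel acc h _; cases fuel <;> simp [PySem.Chars.replace.go]
  | cons c t ih =>
    intro fuel acc h hm
    cases fuel with
    | zero => simp at h
    | succ f =>
      simp only [PySem.Chars.replace.go]
      have hc : c ≠ '=' := fun h' => hm (h' ▸ List.mem_cons_self ..)
      simp [List.isPrefixOf, Ne.symm hc, ih f _ (by simpa using h) (fun h' => hm (List.mem_cons_of_mem _ h'))]

lemma replace_arrow (new s : List Char) (h : '=' ∉ s) :
    PySem.Chars.replace s ['=', '>'] new = s := by
  rw [PySem.Chars.replace]
  simp [go_arrow new s s.length [] le_rfl h]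

-- after the '=' pass no '=' remains
lemma no_eq_left (l : List Char) :
    '=' ∉ l.flatMap (fun c => if c = '=' then " equals ".toList else [c]) := by
  intro h
  rcases List.mem_flatMap.mp h with ⟨c, _, hx⟩
  by_cases hc : c = '='
  · rw [if_pos hc] at hx; revert hx; decide
  · rw [if_neg hc] at hx; exact hc ((List.mem_singleton.mp hx).symm)

-- A's nine fused per-character expansions coincide with B's if/elif chain
lemma percase (c : Char) :
    List.flatMap
      (fun x1 =>
        List.flatMap
          (fun x2 =>
            List.flatMap
              (fun x3 =>
                List.flatMap
                  (fun x4 =>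
                    List.flatMap
                      (fun x5 =>
                        List.flatMap
                          (fun x6 =>
                            List.flatMap
                              (fun x7 =>
                                List.flatMap (fun x8 => if x8 = '\n' then "  new line  ".toList else [x8])
                                  (if x7 = ';' then " semicolon ".toList else [x7]))
                              (if x6 = '=' then " equals ".toList else [x6]))
                          (if x5 = ']' then " close bracket ".toList else [x5]))
                      (if x4 = '[' then " open bracket ".toList else [x4]))
                  (if x3 = ')' then " close parenthesis ".toList else [x3]))
              (if x2 = '(' then " open parenthesis ".toList else [x2]))
          (if x1 = '}' then " close brace ".toList else [x1]))
      (if c = '{' then " open brace ".toList else [c]) = pvPiece c := by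
  by_cases h1 : c = '{'
  · subst h1; decide
  by_cases h2 : c = '}'
  · subst h2; decide
  by_cases h3 : c = '('
  · subst h3; decide
  by_cases h4 : c = ')'
  · subst h4; decide
  by_cases h5 : c = '['
  · subst h5; decide
  by_cases h6 : c = ']'
  · subst h6; decide
  by_cases h7 : c = '='
  · subst h7; decide
  by_cases h8 : c = ';'
  · subst h8; decide
  by_cases h9 : c = '\n'
  · subst h9; decide
  · simp [pvPiece, h1, h2, h3, h4, h5, h6, h7, h8, h9]

-- B's accumulator loop is the flatMap of its chain
lemma altLoop_eq : ∀ (l acc : List Char), pvAltLoop acc l = acc ++ l.flatMap pvPiece := by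
  intro l
  induction l with
  | nil => intro acc; simp [pvAltLoop]
  | cons c t ih => intro acc; simp [pvAltLoop, ih]

lemma alt_toList (code : String) :
    (format_code_for_speech_py_alt code).toList = code.toList.flatMap pvPiece := by
  unfold format_code_for_speech_py_alt
  rw [altLoop_eq]
  simp

-- ===== VERDICT (by name: the statement is the Claim_ definition above) =====
set_option maxHeartbeats 1000000 in
theorem format_code_for_speech_py_spec : Claim_equal_format_code_for_speech_py := by
  intro code _
  unfold Spec_format_code_for_speech_py
  apply String.toList_inj.mp
  rw [alt_toList]
  unfold format_code_for_speech_py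
  rw [pvItems]
  simp only [List.foldl]
  rw [show (" " ++ "open brace" ++ " " : String) = " open brace " from by decide,
      show (" " ++ "close brace" ++ " " : String) = " close brace " from by decide,
      show (" " ++ "open parenthesis" ++ " " : String) = " open parenthesis " from by decide,
      show (" " ++ "close parenthesis" ++ " " : String) = " close parenthesis " from by decide,
      show (" " ++ "open bracket" ++ " " : String) = " open bracket " from by decide,
      show (" " ++ "close bracket" ++ " " : String) = " close bracket " from by decide,
      show (" " ++ "equals" ++ " " : String) = " equals " from by decide,
      show (" " ++ "arrow" ++ " " : String) = " arrow " from by decide,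
      show (" " ++ "semicolon" ++ " " : String) = " semicolon " from by decide,
      show (" " ++ " new line " ++ " " : String) = "  new line  " from by decide]
  simp only [PySem.Str.toList_replace]
  rw [show ("{" : String).toList = ['{'] from by decide,
      show ("}" : String).toList = ['}'] from by decide,
      show ("(" : String).toList = ['('] from by decide,
      show (")" : String).toList = [')'] from by decide,
      show ("[" : String).toList = ['['] from by decide,
      show ("]" : String).toList = [']'] from by decide,
      show ("=" : String).toList = ['='] from by decide,
      show ("=>" : String).toList = ['=', '>'] from by decide,
      show (";" : String).toList = [';'] from by decide,
      show ("\n" : String).toList = ['\n'] from by decide]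
  rw [replace_single, replace_single, replace_single, replace_single, replace_single,
      replace_single, replace_single]
  rw [replace_arrow _ _ (no_eq_left _)]
  rw [replace_single, replace_single]
  simp only [List.flatMap_assoc]
  apply List.flatMap_congr
  intro c _
  exact percase c
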